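-- pv_equiv track=rewrite | github.com/LuisFlorEsq/Automata-Theory-Programs | Noveno_Programa/turing_animation.py | convert_description
-- ===== SOURCE A (Python) =====
-- def convert_description(description):
--     """
--     Takes a description as string and split it into a list considering qo, qi, ... as a single element
--
--     Args:
--         description (_string_): String description in the descriptions_list
--     """
--
--     i = 0
--     size_description = len(description)
--     current_description = []
--
--     while i < size_description:
--
--         if description[i] == 'q':
--
--             # Concatenate the next character
--
--             current_description.append(description[i:i+2])
--             i+=2
--         else:
--
--             current_description.append(description[i])
--             i+=1
--
--
--     return current_description
-- ===== SOURCE B (Python) =====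
-- import re
--
-- def convert_description(description):
--     # One regex-engine scan: greedily match 'q' plus at most one following
--     # character (so a trailing 'q' is a lone token), otherwise one character;
--     # [\s\S] instead of '.' so newlines are matched too.
--     return re.findall(r'q[\s\S]?|[\s\S]', description)
-- ===== Notes on version B (the rewrite author's own statement) =====
-- stated objective: idiomatic
-- what changed: Replaces the manual index-walking while loop with slicing by a single regex-engine scan, re.findall(r'q[\s\S]?|[\s\S]', description), whose greedy optional quantifier pairs each 'q' with its following character and whose alternation falls back to single characters.
import Mathlib
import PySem

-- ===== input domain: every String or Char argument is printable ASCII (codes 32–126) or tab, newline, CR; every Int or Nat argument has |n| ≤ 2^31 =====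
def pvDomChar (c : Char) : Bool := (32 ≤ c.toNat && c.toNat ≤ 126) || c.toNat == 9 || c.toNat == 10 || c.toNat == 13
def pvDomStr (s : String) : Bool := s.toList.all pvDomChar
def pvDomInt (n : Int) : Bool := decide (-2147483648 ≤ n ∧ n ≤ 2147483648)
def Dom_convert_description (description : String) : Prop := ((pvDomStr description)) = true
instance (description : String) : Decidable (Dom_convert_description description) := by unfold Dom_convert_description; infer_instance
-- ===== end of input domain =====

-- B replaces A's index-walking while loop (with slicing) by one regex scan,
-- re.findall(r'q[\s\S]?|[\s\S]', description); objective: idiomatic.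

-- ===== PORT A =====
-- while-loop of A: state (i, current_description); guard i < size_description
def pvALoop (chars : List Char) (size i : Nat) (acc : List String) : List String :=
  if i < size then
    if chars.getD i ' ' = 'q' then
      -- current_description.append(description[i:i+2]); i += 2
      pvALoop chars size (i + 2)
        (acc ++ [String.mk (PySem.List.slice chars (some (i : Int)) (some ((i : Int) + 2)))])
    else
      -- current_description.append(description[i]); i += 1
      pvALoop chars size (i + 1) (acc ++ [String.mk [chars.getD i ' ']])
  else acc
termination_by size - i

def convert_description (description : String) : List String :=
  pvALoop description.toList description.toList.length 0 []

-- ===== PORT B =====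
-- Hand port of re.findall(r'q[\s\S]?|[\s\S]', s): PySem has no regex, so the
-- regex engine's leftmost scan is transcribed exactly — at each position the
-- first alternative 'q[\s\S]?' greedily matches 'q' plus one character when
-- available (just 'q' at end of input), otherwise the alternative [\s\S]
-- matches the single character; findall resumes after each match. Exact on
-- all strings (both alternatives match any character, incl. newlines).
def pvReFindall : List Char → List String
  | [] => []
  | c :: rest =>
    if c = 'q' then
      match rest with
      | [] => [String.mk [c]]
      | d :: rest' => String.mk [c, d] :: pvReFindall rest'
    else String.mk [c] :: pvReFindall rest

def convert_description_alt (description : String) : List String :=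
  pvReFindall description.toList

-- ===== PRECONDITION & SPEC =====
def Spec_convert_description (description : String) (out : List String) : Prop := out = convert_description_alt description
instance (description : String) (out : List String) : Decidable (Spec_convert_description description out) := by unfold Spec_convert_description; infer_instance

-- ===== CLAIM (what is proved, stated in full; the proofs are below) =====
def Claim_equal_convert_description : Prop := ∀ (description : String), Dom_convert_description description → Spec_convert_description description (convert_description description)

-- ===== LEMMAS AND PROOFS =====

theorem pvReFindall_q_cons (d : Char) (rest : List Char) :
    pvReFindall ('q' :: d :: rest) = String.mk ['q', d] :: pvReFindall rest := rfl

theorem pvReFindall_q_nil : pvReFindall ['q'] = [String.mk ['q']] := rfl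

theorem pvReFindall_cons_ne (c : Char) (rest : List Char) (h : c ≠ 'q') :
    pvReFindall (c :: rest) = String.mk [c] :: pvReFindall rest := by
  cases rest <;> simp only [pvReFindall, if_neg h]

theorem pvALoop_eq (chars : List Char) :
    ∀ (n i : Nat) (acc : List String), chars.length - i ≤ n →
      pvALoop chars chars.length i acc = acc ++ pvReFindall (chars.drop i) := by
  intro n
  induction n with
  | zero =>
    intro i acc h
    have hi : chars.length ≤ i := by omega
    rw [pvALoop]
    simp [Nat.not_lt.mpr hi, List.drop_eq_nil_of_le hi, pvReFindall]
  | succ n ih =>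
    intro i acc h
    by_cases hi : i < chars.length
    · have hdrop : chars.drop i = chars[i] :: chars.drop (i + 1) :=
        List.drop_eq_getElem_cons hi
      have hget : chars.getD i ' ' = chars[i] := List.getD_eq_getElem chars ' ' hi
      rw [pvALoop]
      rw [if_pos hi, hget]
      by_cases hq : chars[i] = 'q'
      · rw [if_pos hq]
        have hslice : PySem.List.slice chars (some (i : Int)) (some ((i : Int) + 2))
            = (chars.drop i).take 2 := by
          have := PySem.List.slice_natCast_add chars i 2
          simpa using this
        by_cases hend : i + 1 < chars.length
        · have hdrop1 : chars.drop (i + 1) = chars[i+1] :: chars.drop (i + 2) :=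
            List.drop_eq_getElem_cons hend
          rw [ih (i + 2) _ (by omega), hslice, hdrop, hdrop1, hq, pvReFindall_q_cons]
          simp only [List.take_succ_cons, List.take_zero, List.append_assoc, List.cons_append,
            List.nil_append]
        · have h2 : chars.length ≤ i + 1 := by omega
          have hdrop1 : chars.drop (i + 1) = [] := List.drop_eq_nil_of_le h2
          rw [pvALoop]
          have hno : ¬ (i + 2 < chars.length) := by omega
          rw [if_neg hno, hslice, hdrop, hdrop1, hq, pvReFindall_q_nil]
          simp
      · rw [if_neg hq, ih (i + 1) _ (by omega), hdrop, pvReFindall_cons_ne _ _ hq]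
        simp
    · rw [pvALoop]
      simp [hi, List.drop_eq_nil_of_le (Nat.not_lt.mp hi), pvReFindall]

-- ===== VERDICT (by name: the statement is the Claim_ definition above) =====
theorem convert_description_spec : Claim_equal_convert_description := by
  intro description _
  unfold Spec_convert_description convert_description convert_description_alt
  simpa using pvALoop_eq description.toList description.toList.length 0 [] (by omega)
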